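-- pv_equiv track=rewrite | github.com/googleapis/google-cloud-python | packages/gcp-sphinx-docfx-yaml/docfx_yaml/extension.py | _parse_enum_content
-- ===== SOURCE A (Python) =====
-- from collections.abc import Mapping, MutableSet, Sequence
--
-- def indent_code_left(lines, tab_space):
--     """Indents code lines left by tab_space.
--
--     Args:
--         lines: String lines of code.
--         tab_space: Number of spaces to indent to left by.
--
--     Returns:
--         String lines of left-indented code.
--     """
--     parts = lines.split("\n")
--     parts = [part[tab_space:] for part in parts]
--     return "\n".join(parts)
--
-- def _parse_enum_content(parts: Sequence[str]) -> Sequence[Mapping[str, str]]: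
--     """Parses the given content for enums.
--
--     Args:
--         parts: The content to parse, given in the form of a sequence of str,
--             which have been split by newlines and are left-indented.
--
--     Returns:
--         Sequence of mapping of enum entries for name and description.
--
--     Raises:
--         ValueError: If the `Values` enum docstring is malformed.
--     """
--     enum_content: MutableSequence[Mapping[str, str]] = []
--     enum_name = ""
--     enum_description = []
--     for part in parts:
--         if (
--             (current_tab_space := len(part) - len(part.lstrip(" "))) > 0
--         ):
--             enum_description.append(indent_code_left(part, current_tab_space))
--             continue
--
--         # Add the new enum and start collecting new entry.
--         if enum_name and enum_description:
--             enum_content.append({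
--                 "id": enum_name,
--                 "description": " ".join(enum_description),
--         })
--
--         enum_description = []
--         # Only collect the name, not the value.
--         enum_name = part.split(" ")[0]
--
--         if not enum_name and not enum_description:
--             raise ValueError(
--                 "The enum docstring is not formatted well. Check the"
--                 " docstring:\n\n{}".format("\n".join(parts))
--             )
--
--     # Add the last entry.
--     if not enum_name or not enum_description:
--         raise ValueError(
--             "The enum docstring is not formatted well. Check the"
--             " docstring:\n\n{}".format("\n".join(parts))
--         )
--
--     enum_content.append({
--         "id": enum_name,
--         "description": " ".join(enum_description),
--     })
--
--     return enum_content
-- ===== SOURCE B (Python) =====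
-- from collections.abc import Mapping, MutableSet, Sequence
--
-- def indent_code_left(lines, tab_space):
--     parts = lines.split("\n")
--     parts = [part[tab_space:] for part in parts]
--     return "\n".join(parts)
--
-- def _tab(part):
--     return len(part) - len(part.lstrip(" "))
--
-- def _parse_enum_content(parts: Sequence[str]) -> Sequence[Mapping[str, str]]:
--     """Two-pass rewrite: first partition `parts` into (header, body) segments,
--     then build the entries from the segments."""
--     n = len(parts)
--     i = 0
--     # Indented lines before the first header carry no enum name: skip them.
--     while i < n and _tab(parts[i]) > 0:
--         i += 1
--     segments = []
--     while i < n: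
--         header = parts[i]
--         i += 1
--         body = []
--         while i < n and (tab := _tab(parts[i])) > 0:
--             body.append(indent_code_left(parts[i], tab))
--             i += 1
--         segments.append((header, body))
--     # The docstring must contain at least one header, every header must start
--     # with a name, and the final segment must have a description.
--     if (
--         not segments
--         or any(header.split(" ")[0] == "" for header, _ in segments)
--         or not segments[-1][1]
--     ):
--         raise ValueError(
--             "The enum docstring is not formatted well. Check the"
--             " docstring:\n\n{}".format("\n".join(parts))
--         )
--     return [
--         {"id": header.split(" ")[0], "description": " ".join(body)}
--         for header, body in segments
--         if body
--     ]
-- ===== Notes on version B (the rewrite author's own statement) =====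
-- stated objective: alternative
-- what changed: Replaces A's single stateful loop (open name/description accumulator with conditional flushing) by a two-pass decomposition: partition the lines into (header, body) segments with index-based scans, then emit the entries from the segments with one comprehension; Pre_ excludes exactly the malformed docstrings on which both A and B raise ValueError.
import Mathlib
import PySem

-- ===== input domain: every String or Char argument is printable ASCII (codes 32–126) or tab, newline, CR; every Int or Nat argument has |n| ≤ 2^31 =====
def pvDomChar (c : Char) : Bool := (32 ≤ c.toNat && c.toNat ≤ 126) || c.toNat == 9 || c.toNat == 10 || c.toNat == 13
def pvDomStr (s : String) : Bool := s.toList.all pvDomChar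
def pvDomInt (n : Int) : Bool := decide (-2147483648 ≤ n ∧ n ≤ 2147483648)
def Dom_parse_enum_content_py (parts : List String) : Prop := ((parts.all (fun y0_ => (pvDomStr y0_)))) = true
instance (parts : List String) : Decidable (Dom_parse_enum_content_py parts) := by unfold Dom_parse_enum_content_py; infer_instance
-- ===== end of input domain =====

-- B re-decomposes A's single stateful loop into two passes (segment the lines, then build the
-- entries); same return value on every input where A returns (raising inputs are outside Pre_).

-- ===== PORT A =====
-- shared module helper: indent_code_left(lines, tab_space)
def indent_code_left_py (lines : String) (tab_space : Nat) : String :=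
  PySem.Str.join "\n" (((PySem.Str.split? lines "\n").getD []).map
    (fun part => PySem.Str.slice part (some (tab_space : Int)) none))

-- len(part) - len(part.lstrip(" ")) = the number of leading ' ' characters (exact: lstrip(" ")
-- removes exactly the leading spaces); used by both Pythons.
def pvTab (part : String) : Nat := (part.toList.takeWhile (· == ' ')).length

-- part.split(" ")[0]; split(" ") always returns a nonempty list, so [0] is its head (exact).
def pvTok (part : String) : String := ((PySem.Str.split? part " ").getD []).headD ""

-- the body of A's `for part in parts` loop over state (enum_content, enum_name, enum_description);
-- where Python raises ValueError (new header token empty) the input is outside Pre_ and the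
-- port just continues.
def pvStepA (st : List (List (String × String)) × String × List String) (part : String) :
    List (List (String × String)) × String × List String :=
  let t := pvTab part
  if 0 < t then (st.1, st.2.1, st.2.2 ++ [indent_code_left_py part t])
  else
    let content := if st.2.1 ≠ "" ∧ st.2.2 ≠ [] then
        st.1 ++ [[("id", st.2.1), ("description", PySem.Str.join " " st.2.2)]] else st.1
    (content, pvTok part, [])

def parse_enum_content_py (parts : List String) : List (List (String × String)) :=
  let st := parts.foldl pvStepA ([], "", [])
  -- Python raises ValueError when the final name or description is empty; outside Pre_
  if st.2.1 = "" ∨ st.2.2 = [] then []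
  else st.1 ++ [[("id", st.2.1), ("description", PySem.Str.join " " st.2.2)]]

-- ===== PORT B =====
def pvIndented (part : String) : Bool := 0 < pvTab part

-- B's first pass: the two index `while` loops — skip the indented prefix, then repeatedly take a
-- header and the indented lines after it as its body.
def pvSegs : List String → List (String × List String)
  | [] => []
  | part :: rest =>
    if pvIndented part then pvSegs rest
    else (part, (rest.takeWhile pvIndented).map (fun q => indent_code_left_py q (pvTab q)))
        :: pvSegs (rest.dropWhile pvIndented)
termination_by parts => parts.length
decreasing_by
  · simp
  · have := List.length_dropWhile_le (p := pvIndented) (l := rest); simp; omega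

def pvEntry (header : String) (body : List String) : List (String × String) :=
  [("id", pvTok header), ("description", PySem.Str.join " " body)]

-- B's second pass (the comprehension); Python B raises ValueError when there is no segment, a
-- header token is empty, or the last segment has no body — all outside Pre_, where the port
-- simply keeps emitting the comprehension's entries.
def pvBuild : List (String × List String) → List (List (String × String))
  | [] => []
  | (h, b) :: rest => if b ≠ [] then pvEntry h b :: pvBuild rest else pvBuild rest

def parse_enum_content_py_alt (parts : List String) : List (List (String × String)) :=
  pvBuild (pvSegs parts)

-- ===== PRECONDITION & SPEC =====
-- Pre_ excludes exactly the inputs on which Python A raises ValueError: an empty line, no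
-- unindented (header) line at all, or no indented description line after the last header.
def Pre_parse_enum_content_py (parts : List String) : Prop :=
  (∀ p ∈ parts, p ≠ "") ∧ (∃ p ∈ parts, pvIndented p = false) ∧
  (∃ q, parts.getLast? = some q ∧ pvIndented q = true)
instance (parts : List String) : Decidable (Pre_parse_enum_content_py parts) := by
  unfold Pre_parse_enum_content_py; infer_instance

def pvWitness_parse_enum_content_py : List String :=
  ["VALUE_A (1)", "  first value", "VALUE_B (2)", "  second", "  value"]

def Spec_parse_enum_content_py (parts : List String) (out : List (List (String × String))) : Prop := out = parse_enum_content_py_alt parts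
instance (parts : List String) (out : List (List (String × String))) : Decidable (Spec_parse_enum_content_py parts out) := by unfold Spec_parse_enum_content_py; infer_instance

-- ===== CLAIM (what is proved, stated in full; the proofs are below) =====
def Claim_equal_parse_enum_content_py : Prop := ∀ (parts : List String), Dom_parse_enum_content_py parts → Pre_parse_enum_content_py parts → Spec_parse_enum_content_py parts (parse_enum_content_py parts)

-- ===== LEMMAS AND PROOFS =====

-- A's epilogue after the loop, as a function of the final state.
def pvFinalA (st : List (List (String × String)) × String × List String) :
    List (List (String × String)) :=
  if st.2.1 = "" ∨ st.2.2 = [] then []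
  else st.1 ++ [[("id", st.2.1), ("description", PySem.Str.join " " st.2.2)]]

-- B's second pass relative to a still-open segment (name already tokenised, body so far).
def pvBuildOpen (name : String) (d : List String) :
    List (String × List String) → List (List (String × String))
  | [] => if d = [] then [] else [[("id", name), ("description", PySem.Str.join " " d)]]
  | (h, b) :: ss =>
      (if d = [] then [] else [[("id", name), ("description", PySem.Str.join " " d)]])
        ++ pvBuildOpen (pvTok h) b ss

theorem pv_go_acc (sep : List Char) (fuel : Nat) :
    ∀ (l cur : List Char) (a : List Char) (accs : List (List Char)),
      ∃ r, PySem.Chars.splitOn.go sep fuel l cur (accs ++ [a]) = a :: r := by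
  induction fuel with
  | zero =>
    intro l cur a accs
    exact ⟨accs.reverse ++ [cur.reverse ++ l], by simp [PySem.Chars.splitOn.go]⟩
  | succ n ih =>
    intro l cur a accs
    cases l with
    | nil => exact ⟨accs.reverse ++ [cur.reverse], by simp [PySem.Chars.splitOn.go]⟩
    | cons c rest =>
      by_cases hp : sep.isPrefixOf (c :: rest) = true
      · obtain ⟨r, hr⟩ := ih (List.drop sep.length (c :: rest)) [] a (cur.reverse :: accs)
        refine ⟨r, ?_⟩
        simp only [PySem.Chars.splitOn.go, hp, if_true]
        simpa using hr
      · obtain ⟨r, hr⟩ := ih rest (c :: cur) a accs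
        refine ⟨r, ?_⟩
        simp only [PySem.Chars.splitOn.go, hp, if_false]
        exact hr

theorem pv_go_nil (sep : List Char) (fuel : Nat) :
    ∀ (l cur : List Char),
      ∃ t r, PySem.Chars.splitOn.go sep fuel l cur [] = (cur.reverse ++ t) :: r := by
  induction fuel with
  | zero => intro l cur; exact ⟨l, [], by simp [PySem.Chars.splitOn.go]⟩
  | succ n ih =>
    intro l cur
    cases l with
    | nil => exact ⟨[], [], by simp [PySem.Chars.splitOn.go]⟩
    | cons c rest =>
      by_cases hp : sep.isPrefixOf (c :: rest) = true
      · obtain ⟨r, hr⟩ := pv_go_acc sep n (List.drop sep.length (c :: rest)) [] cur.reverse []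
        refine ⟨[], r, ?_⟩
        simp only [PySem.Chars.splitOn.go, hp, if_true]
        simpa using hr
      · obtain ⟨t, r, hr⟩ := ih rest (c :: cur)
        refine ⟨c :: t, r, ?_⟩
        simp only [PySem.Chars.splitOn.go, hp, if_false]
        rw [hr]; simp

theorem pv_tok_ne (p : String) (hne : p ≠ "") (hind : pvIndented p = false) : pvTok p ≠ "" := by
  cases hc : p.toList with
  | nil => exact absurd (String.toList_eq_nil_iff.mp hc) hne
  | cons c cs =>
    have hcsp : (c == ' ') = false := by
      by_contra h
      have hc' : c = ' ' := by simpa using h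
      rw [pvIndented, pvTab, hc, hc'] at hind
      simp [List.takeWhile_cons] at hind
    have hpre : ([' '] : List Char).isPrefixOf (c :: cs) = false := by
      simp [List.isPrefixOf, BEq.comm] at hcsp ⊢
      intro h
      first | exact hcsp h | exact hcsp h.symm
    unfold pvTok PySem.Str.split? PySem.Chars.split? PySem.Chars.splitOn
    have hsep : (" " : String).toList = [' '] := by decide
    rw [hc, hsep]
    simp only [List.isEmpty_cons, List.length_cons]
    have hgo1 : PySem.Chars.splitOn.go [' '] (cs.length + 1 + 1) (c :: cs) [] [] =
        PySem.Chars.splitOn.go [' '] (cs.length + 1) cs [c] [] := by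
      simp only [PySem.Chars.splitOn.go]
      rw [hpre]
      simp
    obtain ⟨t, r, hr⟩ := pv_go_nil [' '] (cs.length + 1) cs [c]
    simp only [Option.getD_some, hgo1, hr]
    simp only [List.reverse_cons, List.reverse_nil, List.nil_append, List.cons_append,
      List.map_cons, List.headD_cons]
    intro h
    have := congrArg String.toList h
    simp at this

theorem pv_buildOpen_eq (ss : List (String × List String)) :
    ∀ (h : String) (b : List String), pvBuildOpen (pvTok h) b ss = pvBuild ((h, b) :: ss) := by
  induction ss with
  | nil => intro h b; by_cases hb : b = [] <;> simp [pvBuildOpen, pvBuild, pvEntry, hb]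
  | cons s ss ih =>
    intro h b
    obtain ⟨h2, b2⟩ := s
    have hrw : pvBuildOpen (pvTok h) b ((h2, b2) :: ss) =
        (if b = [] then [] else [pvEntry h b]) ++ pvBuildOpen (pvTok h2) b2 ss := by
      simp [pvBuildOpen, pvEntry]
    rw [hrw, ih h2 b2]
    by_cases hb : b = [] <;> simp [pvBuild, hb]

theorem pv_main (parts : List String) :
    ∀ (content : List (List (String × String))) (name : String) (desc : List String),
      (∀ p ∈ parts, p ≠ "") → name ≠ "" → (parts = [] → desc ≠ []) →
      (∀ q, parts.getLast? = some q → pvIndented q = true) →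
      pvFinalA (parts.foldl pvStepA (content, name, desc)) =
        content ++ pvBuildOpen name
          (desc ++ (parts.takeWhile pvIndented).map (fun q => indent_code_left_py q (pvTab q)))
          (pvSegs (parts.dropWhile pvIndented)) := by
  induction parts with
  | nil =>
    intro content name desc _ hname hdesc _
    have hd := hdesc rfl
    simp [pvFinalA, pvSegs, pvBuildOpen, hname, hd]
  | cons p ps ih =>
    intro content name desc hne hname hdesc hlast
    have hne' : ∀ x ∈ ps, x ≠ "" := fun x hx => hne x (List.mem_cons_of_mem _ hx)
    have hlast' : ∀ q, ps.getLast? = some q → pvIndented q = true := by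
      intro q hq
      apply hlast
      cases ps with
      | nil => simp at hq
      | cons a l => simpa [List.getLast?_cons_cons] using hq
    by_cases hi : pvIndented p = true
    · have hstep : pvStepA (content, name, desc) p =
          (content, name, desc ++ [indent_code_left_py p (pvTab p)]) := by
        simp [pvStepA, show 0 < pvTab p from by simpa [pvIndented] using hi]
      rw [List.foldl_cons, hstep,
        ih content name (desc ++ [indent_code_left_py p (pvTab p)]) hne' hname
          (fun _ => by simp) hlast']
      simp [List.takeWhile_cons, List.dropWhile_cons, hi]
    · have hif : pvIndented p = false := by simpa using hi
      have h0 : ¬ 0 < pvTab p := by simpa [pvIndented] using hif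
      have hps : ps ≠ [] := by
        intro h; subst h
        have := hlast p (by simp)
        rw [hif] at this; exact absurd this (by simp)
      have htok : pvTok p ≠ "" := pv_tok_ne p (hne p List.mem_cons_self) hif
      have hsegs : pvSegs (p :: ps) =
          (p, (ps.takeWhile pvIndented).map (fun q => indent_code_left_py q (pvTab q)))
            :: pvSegs (ps.dropWhile pvIndented) := by
        rw [pvSegs]; simp [hif]
      by_cases hd : desc = []
      · have hstep : pvStepA (content, name, desc) p = (content, pvTok p, []) := by
          simp [pvStepA, h0, hd]
        rw [List.foldl_cons, hstep,
          ih content (pvTok p) [] hne' htok (fun h => absurd h hps) hlast']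
        simp [List.takeWhile_cons, List.dropWhile_cons, hif, hsegs, pvBuildOpen, hd]
      · have hstep : pvStepA (content, name, desc) p =
            (content ++ [[("id", name), ("description", PySem.Str.join " " desc)]],
              pvTok p, []) := by
          simp [pvStepA, h0, hname, hd]
        rw [List.foldl_cons, hstep,
          ih (content ++ [[("id", name), ("description", PySem.Str.join " " desc)]])
            (pvTok p) [] hne' htok (fun h => absurd h hps) hlast']
        simp [List.takeWhile_cons, List.dropWhile_cons, hif, hsegs, pvBuildOpen, hd]

theorem pv_prefix (parts : List String) :
    ∀ (desc : List String), (∀ p ∈ parts, p ≠ "") → (∃ p ∈ parts, pvIndented p = false) →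
      (∀ q, parts.getLast? = some q → pvIndented q = true) →
      pvFinalA (parts.foldl pvStepA ([], "", desc)) = pvBuild (pvSegs parts) := by
  induction parts with
  | nil => intro desc _ hex _; simp at hex
  | cons p ps ih =>
    intro desc hne hex hlast
    have hne' : ∀ x ∈ ps, x ≠ "" := fun x hx => hne x (List.mem_cons_of_mem _ hx)
    have hlast' : ∀ q, ps.getLast? = some q → pvIndented q = true := by
      intro q hq
      apply hlast
      cases ps with
      | nil => simp at hq
      | cons a l => simpa [List.getLast?_cons_cons] using hq
    by_cases hi : pvIndented p = true
    · have hex' : ∃ x ∈ ps, pvIndented x = false := by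
        obtain ⟨x, hx, hxf⟩ := hex
        rcases List.mem_cons.mp hx with rfl | hx'
        · rw [hi] at hxf; exact absurd hxf (by simp)
        · exact ⟨x, hx', hxf⟩
      have hstep : pvStepA ([], "", desc) p =
          ([], "", desc ++ [indent_code_left_py p (pvTab p)]) := by
        simp [pvStepA, show 0 < pvTab p from by simpa [pvIndented] using hi]
      rw [List.foldl_cons, hstep, ih (desc ++ [indent_code_left_py p (pvTab p)]) hne' hex' hlast']
      rw [pvSegs]; simp [hi]
    · have hif : pvIndented p = false := by simpa using hi
      have h0 : ¬ 0 < pvTab p := by simpa [pvIndented] using hif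
      have hps : ps ≠ [] := by
        intro h; subst h
        have := hlast p (by simp)
        rw [hif] at this; exact absurd this (by simp)
      have htok : pvTok p ≠ "" := pv_tok_ne p (hne p List.mem_cons_self) hif
      have hstep : pvStepA ([], "", desc) p = ([], pvTok p, []) := by
        simp [pvStepA, h0]
      rw [List.foldl_cons, hstep,
        pv_main ps [] (pvTok p) [] hne' htok (fun h => absurd h hps) hlast']
      rw [pvSegs]; simp only [hif, if_neg, Bool.false_eq_true, not_false_eq_true, if_false]
      rw [← pv_buildOpen_eq]
      simp

-- ===== VERDICT (by name: the statement is the Claim_ definition above) =====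
theorem parse_enum_content_py_spec : Claim_equal_parse_enum_content_py := by
  intro parts _ hpre
  obtain ⟨hne, hhead, q, hlast, hq⟩ := hpre
  show parse_enum_content_py parts = parse_enum_content_py_alt parts
  have h1 : parse_enum_content_py parts = pvFinalA (parts.foldl pvStepA ([], "", [])) := rfl
  rw [h1, pv_prefix parts [] hne hhead (fun r hr => by rw [hr] at hlast; cases hlast; exact hq)]
  rfl
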